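-- pv_equiv track=rewrite | github.com/amanchourasiya/leetcode | algoexpert/numbersInPi.py | helper
-- ===== SOURCE A (Python) =====
-- def helper(pi, nums, cache):
--     if len(pi) == 0:
--         return 0
--
--     newNum = pi[0]
--     i = 1
--     while i<len(pi) and newNum not in nums:
--         newNum = pi[:i+1]
--         i+=1
--
--     if i < len(pi):
--         cache[pi] = 1 + helper(pi[i+1:], nums, cache)
--     else:
--         cache[pi] = 0
--
--     return cache[pi]
-- ===== SOURCE B (Python) =====
-- # Iterative accumulator version of A's linear recursion (return-value equivalent).
-- # Note: A memoises into `cache` (writes cache[suffix]); B does not mutate cache —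
-- # the stated equivalence concerns the return value only.
-- def helper(pi, nums, cache):
--     numset = set(nums)
--     count = 0
--     s = pi
--     while s:
--         n = len(s)
--         i = next((k for k in range(1, n) if s[:k] in numset), n)
--         if i == n:
--             return count
--         count += 1
--         s = s[i + 1:]
--     return count
-- ===== Notes on version B (the rewrite author's own statement) =====
-- stated objective: simpler
-- what changed: A's linear recursion with memo-dict writes (cache[pi] = 1 + helper(rest)) is replaced by a single forward while-loop with an integer count accumulator and a set for the prefix membership test; no cache/dict is kept at all since the return value never reads it.
import Mathlib
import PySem

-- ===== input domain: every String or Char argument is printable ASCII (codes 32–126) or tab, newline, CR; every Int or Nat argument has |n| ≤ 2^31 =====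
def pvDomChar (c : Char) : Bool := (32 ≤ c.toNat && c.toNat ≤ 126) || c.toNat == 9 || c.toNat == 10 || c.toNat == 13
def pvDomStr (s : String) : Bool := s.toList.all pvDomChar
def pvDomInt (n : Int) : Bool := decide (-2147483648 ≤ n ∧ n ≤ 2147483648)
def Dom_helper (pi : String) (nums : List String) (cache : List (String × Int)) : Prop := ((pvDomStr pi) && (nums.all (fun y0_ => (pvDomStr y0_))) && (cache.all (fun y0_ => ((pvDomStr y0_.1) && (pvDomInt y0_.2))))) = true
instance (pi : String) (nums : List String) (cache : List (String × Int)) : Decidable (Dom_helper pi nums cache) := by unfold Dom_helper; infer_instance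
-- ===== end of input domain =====

-- B replaces A's linear recursion (with memo writes) by a forward loop with a count
-- accumulator; equivalence is about the RETURN value only — A mutates `cache`
-- (writes cache[suffix] for every suffix reached), B leaves `cache` untouched.

-- ===== PORT A =====
-- the while loop: `while i < len(pi) and newNum not in nums: newNum = pi[:i+1]; i += 1`
-- (pi modeled as List Char; pi[:k] = l.take k, exact on any index)
def findNew (l : List Char) (nums : List String) (newNum : List Char) (i : Nat) : Nat :=
  if i < l.length && !(nums.contains (String.ofList newNum)) then
    findNew l nums (l.take (i + 1)) (i + 1)
  else i
termination_by l.length - i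
decreasing_by rename_i h; simp at h; omega

-- A's recursion; `cache[pi] = v; return cache[pi]` returns exactly the value v just
-- written (Dict insert-then-get of the same key), so the port returns v directly;
-- the cache mutation itself is not modeled (Lean is pure) and never affects the result.
def helperGo (l : List Char) (nums : List String) : Int :=
  if l.length = 0 then 0
  else
    -- newNum = pi[0]; i = 1; while …  (pi[0] as a 1-char string is l.take 1)
    let i := findNew l nums (l.take 1) 1
    if i < l.length then 1 + helperGo (l.drop (i + 1)) nums else 0
termination_by l.length
decreasing_by simp [List.length_drop]; omega

def helper (pi : String) (nums : List String) (cache : List (String × Int)) : Int :=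
  helperGo pi.toList nums

-- ===== PORT B =====
-- `next((k for k in range(1, n) if s[:k] in numset), n)`
def scanPrefix (l : List Char) (numset : PySem.Set String) : Nat :=
  match (List.range' 1 (l.length - 1)).find?
      (fun k => PySem.Set.contains numset (String.ofList (l.take k))) with
  | some k => k
  | none => l.length

-- the `while s:` loop with the running count
def altGo (l : List Char) (numset : PySem.Set String) (count : Int) : Int :=
  if l.length = 0 then count
  else
    let i := scanPrefix l numset
    if i = l.length then count
    else altGo (l.drop (i + 1)) numset (count + 1)
termination_by l.length
decreasing_by simp [List.length_drop]; omega

def helper_alt (pi : String) (nums : List String) (cache : List (String × Int)) : Int :=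
  altGo pi.toList (PySem.Set.ofList nums) 0

-- ===== PRECONDITION & SPEC =====
def Spec_helper (pi : String) (nums : List String) (cache : List (String × Int)) (out : Int) : Prop := out = helper_alt pi nums cache
instance (pi : String) (nums : List String) (cache : List (String × Int)) (out : Int) : Decidable (Spec_helper pi nums cache out) := by unfold Spec_helper; infer_instance

-- ===== CLAIM (what is proved, stated in full; the proofs are below) =====
def Claim_equal_helper : Prop := ∀ (pi : String) (nums : List String) (cache : List (String × Int)), Dom_helper pi nums cache → Spec_helper pi nums cache (helper pi nums cache)

-- ===== LEMMAS AND PROOFS =====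

-- A's while loop, started at position i with newNum = l.take i, computes the same
-- index as B's generator search over range(i, len(l)).
theorem findNew_eq_range (l : List Char) (nums : List String) :
    ∀ i, 1 ≤ i → i ≤ l.length →
    findNew l nums (l.take i) i =
      (match (List.range' i (l.length - i)).find?
          (fun k => nums.contains (String.ofList (l.take k))) with
       | some k => k
       | none => l.length) := by
  intro i h1 h2
  induction hn : l.length - i generalizing i with
  | zero =>
    have hi : i = l.length := by omega
    rw [findNew.eq_def]
    simp [hi]
  | succ m ih =>
    have hlt : i < l.length := by omega
    have hr : List.range' i (m + 1) = i :: List.range' (i + 1) m :=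
      List.range'_succ ..
    rw [hr]
    by_cases hc : nums.contains (String.ofList (l.take i))
    · rw [findNew.eq_def]
      have hm : String.ofList (l.take i) ∈ nums := by simpa using hc
      simp [hlt, hm]
    · rw [findNew.eq_def]
      have hb : (nums.contains (String.ofList (l.take i))) = false := by
        simpa using hc
      simp only [hlt, hb, decide_true, Bool.not_false, Bool.and_self, if_true]
      rw [ih (i + 1) (by omega) (by omega) (by omega)]
      have hm : ¬ String.ofList (l.take i) ∈ nums := by simpa using hc
      simp [hm]

-- A's scan never runs past the end of the string
theorem findNew_le (l : List Char) (nums : List String) :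
    ∀ i newNum, i ≤ l.length → findNew l nums newNum i ≤ l.length := by
  intro i
  induction hn : l.length - i generalizing i with
  | zero =>
    intro newNum h
    rw [findNew.eq_def]
    have : ¬ i < l.length := by omega
    simp [this, h]
  | succ m ih =>
    intro newNum h
    rw [findNew.eq_def]
    by_cases hc : (decide (i < l.length) && !nums.contains (String.ofList newNum)) = true
    · rw [if_pos hc]
      simp at hc
      exact ih (i + 1) (by omega) _ (by omega)
    · rw [if_neg hc]; exact h

-- B's loop accumulates exactly A's recursion value
theorem altGo_eq (nums : List String) :
    ∀ (l : List Char) (count : Int),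
      altGo l (PySem.Set.ofList nums) count = count + helperGo l nums := by
  intro l
  induction hn : l.length using Nat.strong_induction_on generalizing l with
  | _ n ih =>
  intro count
  by_cases hl : l.length = 0
  · rw [altGo, helperGo]; simp [hl]
  · have hscan : scanPrefix l (PySem.Set.ofList nums) = findNew l nums (l.take 1) 1 := by
      rw [findNew_eq_range l nums 1 (by omega) (by omega)]
      unfold scanPrefix
      simp
    rw [altGo, helperGo]
    simp only [hl, if_false, hscan]
    by_cases hi : findNew l nums (l.take 1) 1 = l.length
    · simp [hi]
    · have hle : findNew l nums (l.take 1) 1 ≤ l.length :=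
        findNew_le l nums 1 _ (by omega)
      have hlt2 : findNew l nums (l.take 1) 1 < l.length := by omega
      simp only [hi, if_false, hlt2, if_true]
      rw [ih (l.drop (findNew l nums (l.take 1) 1 + 1)).length
            (by subst hn; simp [List.length_drop]; omega) _ rfl]
      ring

-- ===== VERDICT (by name: the statement is the Claim_ definition above) =====
theorem helper_spec : Claim_equal_helper := by
  intro pi nums cache _
  unfold Spec_helper helper helper_alt
  rw [altGo_eq nums pi.toList 0]
  simp
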